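-- pv_equiv track=rewrite | github.com/ImperialBreakCode/infinity-web | app/pythonBackend/instagram/instagram.py | calculate_posts_and_rows
-- ===== SOURCE A (Python) =====
-- import math
--
-- def calculate_posts_and_rows(posts):
--     posts_count = len(posts)
--     rows = math.ceil(posts_count / 3)
--     last_row_ps = posts_count - (rows - 1) * 3
--     posts_on_row = []
--
--     post_index_fist = 0
--     for r in range(rows):
--         if r == 0:
--             post_index_fist += last_row_ps - 1
--         else:
--             post_index_fist += 3
--         posts_on_row.append(post_index_fist)
--
--     return [posts_on_row, rows]
-- ===== SOURCE B (Python) =====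
-- def calculate_posts_and_rows(posts):
--     idxs = []
--     i = len(posts) - 1
--     while i >= 0:
--         idxs.append(i)
--         i -= 3
--     idxs.reverse()
--     return [idxs, len(idxs)]
-- ===== Notes on version B (the rewrite author's own statement) =====
-- stated objective: simpler
-- what changed: B never computes rows, last_row_ps or a running accumulator: it walks indices down from len(posts)-1 in steps of 3 while nonnegative, reverses the collected list, and returns its length as the row count.
import Mathlib
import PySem

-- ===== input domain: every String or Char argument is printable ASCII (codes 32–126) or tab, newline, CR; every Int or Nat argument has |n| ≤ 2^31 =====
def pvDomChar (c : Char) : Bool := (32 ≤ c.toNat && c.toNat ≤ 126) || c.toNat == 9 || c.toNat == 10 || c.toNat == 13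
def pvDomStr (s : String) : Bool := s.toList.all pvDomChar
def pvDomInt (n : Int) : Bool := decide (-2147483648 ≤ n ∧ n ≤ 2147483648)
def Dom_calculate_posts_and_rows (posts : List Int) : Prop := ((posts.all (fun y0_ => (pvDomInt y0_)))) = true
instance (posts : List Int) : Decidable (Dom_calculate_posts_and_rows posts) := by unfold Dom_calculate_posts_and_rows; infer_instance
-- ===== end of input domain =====

-- B drops A's rows/ceil/accumulator machinery entirely: it walks the indices down
-- from len(posts)-1 in steps of 3, reverses, and reads rows off as the list length;
-- objective: simpler.


-- ===== PORT A =====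
def calculate_posts_and_rows (posts : List Int) : List Int × Int :=
  let posts_count : Int := posts.length
  -- math.ceil(posts_count / 3) on a nonnegative int: exact as -((-posts_count) // 3)
  let rows : Int := -(PySem.Int.floordiv (-posts_count) 3)
  let last_row_ps : Int := posts_count - (rows - 1) * 3
  let res :=
    (PySem.List.pyRange 0 rows 1).foldl
      (fun (st : Int × List Int) r =>
        let post_index_fist := if r == 0 then st.1 + (last_row_ps - 1) else st.1 + 3
        (post_index_fist, st.2 ++ [post_index_fist]))
      (0, [])
  (res.2, rows)

-- ===== PORT B =====
-- the while loop: collect i, i-3, i-6, … while i >= 0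
def pvAltLoop (i : Int) (acc : List Int) : List Int :=
  if _h : 0 ≤ i then pvAltLoop (i - 3) (acc ++ [i]) else acc
termination_by (i + 1).toNat
decreasing_by omega

def calculate_posts_and_rows_alt (posts : List Int) : List Int × Int :=
  let idxs := (pvAltLoop ((posts.length : Int) - 1) []).reverse
  (idxs, (idxs.length : Int))

-- ===== PRECONDITION & SPEC =====
def Spec_calculate_posts_and_rows (posts : List Int) (out : List Int × Int) : Prop := out = calculate_posts_and_rows_alt posts
instance (posts : List Int) (out : List Int × Int) : Decidable (Spec_calculate_posts_and_rows posts out) := by unfold Spec_calculate_posts_and_rows; infer_instance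

-- ===== CLAIM (what is proved, stated in full; the proofs are below) =====
def Claim_equal_calculate_posts_and_rows : Prop := ∀ (posts : List Int), Dom_calculate_posts_and_rows posts → Spec_calculate_posts_and_rows posts (calculate_posts_and_rows posts)

-- ===== LEMMAS AND PROOFS =====

-- prepending i to the shifted map extends the range by one
theorem pv_cons_map_range (i : Int) (k : Nat) :
    i :: (List.range k).map (fun (r : Nat) => (i - 3) - 3 * (r : Int))
      = (List.range (k + 1)).map (fun (r : Nat) => i - 3 * (r : Int)) := by
  apply List.ext_getElem
  · simp
  · intro j h1 h2
    cases j with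
    | zero => simp
    | succ m =>
      simp only [List.getElem_cons_succ, List.getElem_map, List.getElem_range]
      push_cast
      ring

-- B's while loop collects i, i-3, …, i.e. the map r ↦ i - 3r over range(i/3 + 1).
theorem pvAltLoop_eq (i : Int) (acc : List Int) :
    pvAltLoop i acc
      = acc ++ (if 0 ≤ i then (List.range (i.toNat / 3 + 1)).map (fun (r : Nat) => i - 3 * (r : Int)) else []) := by
  fun_induction pvAltLoop i acc with
  | case1 i acc h ih =>
    rw [ih]
    by_cases h3 : 0 ≤ i - 3
    · have hk : (i - 3).toNat / 3 + 1 + 1 = i.toNat / 3 + 1 := by omega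
      simp only [h, h3, if_true, List.append_assoc, List.singleton_append]
      congr 1
      rw [pv_cons_map_range, hk]
    · have hk : i.toNat / 3 = 0 := by omega
      simp only [h, h3, if_true, if_false, hk]
      simp
  | case2 i acc h =>
    simp [h]

-- A's loop over range(0, n): the collected list is the map r ↦ L - 1 + 3r.
theorem pv_loop_eq (L : Int) (n : Nat) :
    (PySem.List.pyRange 0 n 1).foldl
      (fun (st : Int × List Int) r =>
        (if r == 0 then st.1 + (L - 1) else st.1 + 3,
         st.2 ++ [if r == 0 then st.1 + (L - 1) else st.1 + 3]))
      (0, [])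
    = (if n = 0 then 0 else L - 1 + 3 * ((n : Int) - 1),
       (PySem.List.pyRange 0 n 1).map (fun r => L - 1 + 3 * r)) := by
  induction n with
  | zero => simp
  | succ m ih =>
    have hsplit : PySem.List.pyRange 0 ((m : Int) + 1) 1
        = PySem.List.pyRange 0 (m : Int) 1 ++ [(m : Int)] :=
      PySem.List.pyRange_one_succ_right (by exact_mod_cast Nat.zero_le m)
    push_cast
    rw [hsplit, List.foldl_append, List.map_append, ih]
    rcases Nat.eq_zero_or_pos m with hm | hm
    · subst hm; simp
    · have hm' : (m : Int) ≠ 0 := by exact_mod_cast Nat.pos_iff_ne_zero.mp hm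
      simp only [Prod.mk.injEq, List.foldl_cons, List.foldl_nil, List.map_cons, List.map_nil,
        Nat.pos_iff_ne_zero.mp hm, beq_iff_eq, hm', if_false]
      refine ⟨by ring, by simp; ring⟩

-- ===== VERDICT (by name: the statement is the Claim_ definition above) =====
theorem calculate_posts_and_rows_spec : Claim_equal_calculate_posts_and_rows := by
  intro posts _
  unfold Spec_calculate_posts_and_rows calculate_posts_and_rows calculate_posts_and_rows_alt
  simp only []
  set n : Nat := posts.length with hn
  have hrows : -(PySem.Int.floordiv (-(n : Int)) 3) = ((n + 2) / 3 : Nat) := by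
    rw [PySem.Int.floordiv_eq_ediv_of_pos (by norm_num : (0:Int) < 3)]
    omega
  rw [hrows, pv_loop_eq, pvAltLoop_eq]
  rcases Nat.eq_zero_or_pos n with h0 | hpos
  · simp [h0]
  · have hnn : (0:Int) ≤ (n : Int) - 1 := by omega
    have hk : ((n : Int) - 1).toNat / 3 + 1 = (n + 2) / 3 := by omega
    simp only [hnn, if_true, List.nil_append, hk]
    rw [Prod.mk.injEq]
    refine ⟨?_, ?_⟩
    · -- the lists agree elementwise
      apply List.ext_getElem
      · simp [PySem.List.length_pyRange_one]; omega
      · intro j h1 h2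
        have hjlen : j < (n + 2) / 3 := by
          simpa [PySem.List.length_pyRange_one] using h2
        have hjlen' : j < ((List.range ((n + 2) / 3)).map (fun (r : Nat) => ((n:Int) - 1) - 3 * (r : Int))).length := by
          simpa using hjlen
        rw [List.getElem_reverse]
        simp only [List.getElem_map, List.getElem_range, List.length_map, List.length_range,
          PySem.List.getElem_pyRange_one]
        push_cast
        omega
    · -- rows agree
      simp
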